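-- pv_equiv track=rewrite | github.com/comely0120/AI_fashion | blog/views.py | category_to_label_and_num
-- ===== SOURCE A (Python) =====
-- def category_to_label_and_num(category):
--
--     categories = ['long shirt_none', 'long shirt_check', 'long shirt_pattern', 'short shirt_none', 'short shirt_check', 'short shirt_pattern',
--                   'long blouse_none', 'long_blouse_check', 'long blouse_pattern', 'short blouse_none', 'short blouse_check', 'short blouse_pattern',
--                   'long sleeve_none', 'long sleeve_stripe', 'long sleeve_print', 'short sleeve_none', 'short sleeve_stripe', 'short sleeve_print',
--                   'sleeveless_none', 'sleeveless_stripe', 'sleeveless_print', 'long pants_jean', 'long pants_cotton',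
--                   'short pants_jean', 'short pants_cotton', 'long skirt_H', 'long skirt_A', 'long skirt_asymmetric',
--                   'short skirt_H', 'short skirt_A', 'short skirt_asymmetric','long dress_long sleeves', 'long dress_short sleeves',
--                   'short dress_long sleeves', 'short dress_short sleeves']
--     i=0
--     for cate in categories:
--         i = i+1
--         if category == cate:
--             num = str(i)
--             break
--
--     for cate in categories[0:21]:
--         if category == cate:
--             label = "T"
--             return label, num
--
--     for cate in categories[21:31]:
--         if category == cate:
--             label = "B"
--             return label, num
--
--     for cate in categories[31:]:
--         if category == cate:
--             label = "D"
--             return label, num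
-- ===== SOURCE B (Python) =====
-- def category_to_label_and_num(category):
--
--     categories = ['long shirt_none', 'long shirt_check', 'long shirt_pattern', 'short shirt_none', 'short shirt_check', 'short shirt_pattern',
--                   'long blouse_none', 'long_blouse_check', 'long blouse_pattern', 'short blouse_none', 'short blouse_check', 'short blouse_pattern',
--                   'long sleeve_none', 'long sleeve_stripe', 'long sleeve_print', 'short sleeve_none', 'short sleeve_stripe', 'short sleeve_print',
--                   'sleeveless_none', 'sleeveless_stripe', 'sleeveless_print', 'long pants_jean', 'long pants_cotton',
--                   'short pants_jean', 'short pants_cotton', 'long skirt_H', 'long skirt_A', 'long skirt_asymmetric',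
--                   'short skirt_H', 'short skirt_A', 'short skirt_asymmetric','long dress_long sleeves', 'long dress_short sleeves',
--                   'short dress_long sleeves', 'short dress_short sleeves']
--     mapping = {}
--     for i, cate in enumerate(categories):
--         label = "T" if i < 21 else ("B" if i < 31 else "D")
--         mapping[cate] = (label, str(i + 1))
--     return mapping.get(category)
-- ===== Notes on version B (the rewrite author's own statement) =====
-- stated objective: simpler
-- what changed: Replaces A's four sequential scans (one loop to find the index, then three slice scans to pick the label) with a dict built once via enumerate mapping each category to its (label, num) pair, returned by a single mapping.get(category).
-- outside the precondition, e.g. on category_to_label_and_num('long blouse_check'): A returns None, B returns None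
import Mathlib
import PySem

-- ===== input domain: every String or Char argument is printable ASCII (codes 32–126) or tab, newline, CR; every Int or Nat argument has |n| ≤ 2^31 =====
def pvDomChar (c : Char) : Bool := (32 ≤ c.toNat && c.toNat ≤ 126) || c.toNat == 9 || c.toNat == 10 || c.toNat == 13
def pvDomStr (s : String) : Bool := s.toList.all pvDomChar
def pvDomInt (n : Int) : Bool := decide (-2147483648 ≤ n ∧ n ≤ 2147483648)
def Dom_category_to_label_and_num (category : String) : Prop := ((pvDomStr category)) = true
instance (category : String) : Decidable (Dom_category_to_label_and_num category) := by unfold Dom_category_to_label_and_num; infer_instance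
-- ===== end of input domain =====

-- B builds a category→(label,num) dict once with enumerate and does one lookup, instead of A's
-- four sequential scans; return-value equivalence is proved on the 35 listed categories.

-- the verbatim 35-element category list both Pythons carry
def pvCats : List String :=
  ["long shirt_none", "long shirt_check", "long shirt_pattern", "short shirt_none", "short shirt_check", "short shirt_pattern",
   "long blouse_none", "long_blouse_check", "long blouse_pattern", "short blouse_none", "short blouse_check", "short blouse_pattern",
   "long sleeve_none", "long sleeve_stripe", "long sleeve_print", "short sleeve_none", "short sleeve_stripe", "short sleeve_print",
   "sleeveless_none", "sleeveless_stripe", "sleeveless_print", "long pants_jean", "long pants_cotton",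
   "short pants_jean", "short pants_cotton", "long skirt_H", "long skirt_A", "long skirt_asymmetric",
   "short skirt_H", "short skirt_A", "short skirt_asymmetric", "long dress_long sleeves", "long dress_short sleeves",
   "short dress_long sleeves", "short dress_short sleeves"]

-- ===== PORT A =====
-- A's first loop: i starts at 0, incremented before the comparison; on a match num = str(i), break
def pvFindNum : List String → Int → String → Option String
  | [], _, _ => none
  | cate :: rest, i, c =>
      if c == cate then some (PySem.Int.toStr (i + 1)) else pvFindNum rest (i + 1) c

-- A's 'for cate in <slice>: if category == cate: return …' membership scans
def pvScan : List String → String → Bool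
  | [], _ => false
  | cate :: rest, c => if c == cate then true else pvScan rest c

def category_to_label_and_num (category : String) : String × String :=
  let num := pvFindNum pvCats 0 category
  if pvScan (PySem.List.slice pvCats (some 0) (some 21)) category then ("T", num.getD "")
  else if pvScan (PySem.List.slice pvCats (some 21) (some 31)) category then ("B", num.getD "")
  else if pvScan (PySem.List.slice pvCats (some 31) none) category then ("D", num.getD "")
  else ("", "")  -- Python falls off the end and returns None here: excluded by Pre_

-- ===== PORT B =====
def pvLabelOf (i : Int) : String := if i < 21 then "T" else if i < 31 then "B" else "D"

-- B's single enumerate loop building the lookup dict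
def pvMapping : PySem.Dict String (String × String) :=
  (PySem.List.enumerate pvCats 0).foldl
    (fun d p => d.insert p.2 (pvLabelOf p.1, PySem.Int.toStr (p.1 + 1))) PySem.Dict.empty

def category_to_label_and_num_alt (category : String) : String × String :=
  (pvMapping.get? category).getD ("", "")  -- Python's mapping.get: None outside Pre_

-- ===== PRECONDITION & SPEC =====
-- Pre_ excludes categories not in the list: there A (and B) return None, which is not a value
-- of the declared String × String type.
def Pre_category_to_label_and_num (category : String) : Prop := category ∈ pvCats
instance (category : String) : Decidable (Pre_category_to_label_and_num category) := by
  unfold Pre_category_to_label_and_num; infer_instance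

def pvWitness_category_to_label_and_num : String := "long pants_jean"

def Spec_category_to_label_and_num (category : String) (out : String × String) : Prop :=
  out = category_to_label_and_num_alt category
instance (category : String) (out : String × String) : Decidable (Spec_category_to_label_and_num category out) := by
  unfold Spec_category_to_label_and_num; infer_instance

-- ===== CLAIM (what is proved, stated in full; the proofs are below) =====
def Claim_equal_category_to_label_and_num : Prop :=
  ∀ (category : String), Dom_category_to_label_and_num category →
    Pre_category_to_label_and_num category →
    Spec_category_to_label_and_num category (category_to_label_and_num category)

-- ===== LEMMAS AND PROOFS =====
-- both ports agree on every element of the 35-element list, checked by evaluation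
set_option maxRecDepth 4096 in
theorem pv_all_agree :
    pvCats.all (fun c => category_to_label_and_num c == category_to_label_and_num_alt c) = true := by
  decide

-- ===== VERDICT (by name: the statement is the Claim_ definition above) =====
theorem category_to_label_and_num_spec : Claim_equal_category_to_label_and_num := by
  intro c _ hpre
  unfold Pre_category_to_label_and_num at hpre
  unfold Spec_category_to_label_and_num
  exact eq_of_beq (List.all_eq_true.mp pv_all_agree c hpre)
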